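-- pv_equiv track=rewrite | github.com/matichorvat/hsst | hsst/rulextraction/rule_type.py | is_basic_prep
-- ===== SOURCE A (Python) =====
-- def get_node_pos(node):
--     if len(node.split('_')) >= 3:
--         return node.split('_')[2]
--     else:
--         return ''
--
-- def is_nonterminal(node):
--     return node.startswith('X')
--
-- def is_prep(node):
--     return get_node_pos(node) == 'p' or node == 'loc_nonsp' or node == 'comp_equal' or \
--            node == 'interval_p_start' or node == 'interval_p_end'
--
-- def is_basic_prep(nodes, edges):
--     if not len(nodes) >= 3 or not len(edges) >= 2:
--         return False
--
--     prep_index = None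
--     for index, node in enumerate(nodes):
--         if is_prep(node) and prep_index is None:
--             prep_index = str(index)
--
--         elif not is_nonterminal(node):
--             return False
--
--     if prep_index is None:
--         return False
--
--     return True
-- ===== SOURCE B (Python) =====
-- def get_node_pos(node):
--     if len(node.split('_')) >= 3:
--         return node.split('_')[2]
--     else:
--         return ''
--
-- def is_nonterminal(node):
--     return node.startswith('X')
--
-- def is_prep(node):
--     return get_node_pos(node) == 'p' or node == 'loc_nonsp' or node == 'comp_equal' or \
--            node == 'interval_p_start' or node == 'interval_p_end'
--
-- def is_basic_prep(nodes, edges):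
--     if len(nodes) < 3 or len(edges) < 2:
--         return False
--     prep_index = next((i for i, n in enumerate(nodes) if is_prep(n)), None)
--     if prep_index is None:
--         return False
--     return all(is_nonterminal(n) for i, n in enumerate(nodes) if i != prep_index)
-- ===== Notes on version B (the rewrite author's own statement) =====
-- stated objective: simpler
-- what changed: Replaces A's single stateful scan carrying an optional flag and mid-loop early returns with a locate-then-validate decomposition: one pass finds the first preposition index, a second pass checks every other node is nonterminal.
import Mathlib
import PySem

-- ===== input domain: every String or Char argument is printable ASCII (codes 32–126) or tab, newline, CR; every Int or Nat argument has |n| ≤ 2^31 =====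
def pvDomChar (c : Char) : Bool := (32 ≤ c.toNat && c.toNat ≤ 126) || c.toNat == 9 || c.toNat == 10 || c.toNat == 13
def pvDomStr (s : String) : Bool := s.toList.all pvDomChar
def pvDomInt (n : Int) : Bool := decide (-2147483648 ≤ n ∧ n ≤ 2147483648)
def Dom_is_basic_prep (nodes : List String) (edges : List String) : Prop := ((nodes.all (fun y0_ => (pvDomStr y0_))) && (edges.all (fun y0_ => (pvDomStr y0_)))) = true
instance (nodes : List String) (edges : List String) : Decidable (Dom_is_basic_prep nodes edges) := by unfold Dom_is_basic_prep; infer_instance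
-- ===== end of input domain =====

-- B replaces A's single stateful flag-carrying scan with a locate-then-validate two-pass decomposition (simpler; same O(n) cost).

-- ===== PORT A =====
-- node.split('_') with nonempty sep: PySem.Str.split? returns some; getD [] is exact here.
def get_node_pos (node : String) : String :=
  if ((PySem.Str.split? node "_").getD []).length ≥ 3 then
    PySem.List.pyGetD ((PySem.Str.split? node "_").getD []) 2 ""
  else
    ""

def is_nonterminal (node : String) : Bool :=
  PySem.Str.startswith node "X"

def is_prep (node : String) : Bool :=
  get_node_pos node == "p" || node == "loc_nonsp" || node == "comp_equal" ||
    node == "interval_p_start" || node == "interval_p_end"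

-- A's loop: walk nodes with index and the optional prep_index state; early `return False`
-- becomes returning `false`; after the loop A returns `prep_index is not None`.
def isBasicPrepLoopA : List String → Int → Option String → Bool
  | [], _, pi => pi.isSome
  | n :: rest, idx, pi =>
    if is_prep n && pi.isNone then
      isBasicPrepLoopA rest (idx + 1) (some (PySem.Int.toStr idx))
    else if !(is_nonterminal n) then
      false
    else
      isBasicPrepLoopA rest (idx + 1) pi

def is_basic_prep (nodes : List String) (edges : List String) : Bool :=
  if !(nodes.length ≥ 3) || !(edges.length ≥ 2) then
    false
  else
    isBasicPrepLoopA nodes 0 none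

-- ===== PORT B =====
def is_basic_prep_alt (nodes : List String) (edges : List String) : Bool :=
  if nodes.length < 3 || edges.length < 2 then
    false
  else
    match (PySem.List.enumerate nodes).find? (fun p => is_prep p.2) with
    | none => false
    | some (i, _) =>
      ((PySem.List.enumerate nodes).filter (fun p => p.1 ≠ i)).all (fun p => is_nonterminal p.2)

-- ===== PRECONDITION & SPEC =====
def Spec_is_basic_prep (nodes : List String) (edges : List String) (out : Bool) : Prop := out = is_basic_prep_alt nodes edges
instance (nodes : List String) (edges : List String) (out : Bool) : Decidable (Spec_is_basic_prep nodes edges out) := by unfold Spec_is_basic_prep; infer_instance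

-- ===== CLAIM (what is proved, stated in full; the proofs are below) =====
def Claim_equal_is_basic_prep : Prop := ∀ (nodes : List String) (edges : List String), Dom_is_basic_prep nodes edges → Spec_is_basic_prep nodes edges (is_basic_prep nodes edges)

-- ===== LEMMAS AND PROOFS =====

-- After the first prep is recorded, A's loop just checks every remaining node is nonterminal.
theorem loopA_some (l : List String) (idx : Int) (s : String) :
    isBasicPrepLoopA l idx (some s) = l.all is_nonterminal := by
  induction l generalizing idx with
  | nil => simp [isBasicPrepLoopA]
  | cons n rest ih =>
    simp only [isBasicPrepLoopA, Option.isNone_some, Bool.and_false, List.all_cons]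
    by_cases h : is_nonterminal n = true
    · simp [h, ih]
    · simp [h]

-- B's find over enumerate, structurally.
theorem find_enum_cons (n : String) (rest : List String) (s : Int) :
    (PySem.List.enumerate (n :: rest) s).find? (fun p => is_prep p.2) =
      (if is_prep n then some (s, n) else
        (PySem.List.enumerate rest (s + 1)).find? (fun p => is_prep p.2)) := by
  simp [PySem.List.enumerate_cons, List.find?]
  split_ifs with h <;> simp_all

-- When the found index is the start index s, the filter drops exactly the head entry
-- (all later indices exceed s), so B's `all` reduces to `rest.all is_nonterminal`.
theorem filter_ne_head (n : String) (rest : List String) (s : Int) :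
    ((PySem.List.enumerate (n :: rest) s).filter (fun p => p.1 ≠ s)).all (fun p => is_nonterminal p.2)
      = rest.all is_nonterminal := by
  have hmem : ∀ p ∈ PySem.List.enumerate rest (s + 1), p.1 ≠ s := by
    intro p hp
    rcases (PySem.List.mem_enumerate_iff _ _ _).1 hp with ⟨k, hk, rfl⟩
    simp; omega
  rw [PySem.List.enumerate_cons]
  rw [List.filter_cons_of_neg (by simp)]
  rw [List.filter_eq_self.2 (by intro p hp; simpa using hmem p hp)]
  have hall : ∀ (l : List String) (t : Int),
      ((PySem.List.enumerate l t).all fun p => is_nonterminal p.2) = l.all is_nonterminal := by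
    intro l
    induction l with
    | nil => intro t; simp
    | cons m tl ih => intro t; simp [PySem.List.enumerate_cons, ih]
  exact hall rest (s + 1)

-- When the head entry's index i is NOT s (found deeper), the head survives the filter.
theorem filter_ne_cons_ne (n : String) (rest : List String) (s i : Int) (h : s ≠ i) :
    ((PySem.List.enumerate (n :: rest) s).filter (fun p => p.1 ≠ i)).all (fun p => is_nonterminal p.2)
      = (is_nonterminal n &&
         ((PySem.List.enumerate rest (s + 1)).filter (fun p => p.1 ≠ i)).all (fun p => is_nonterminal p.2)) := by
  rw [PySem.List.enumerate_cons]
  rw [List.filter_cons_of_pos (by simpa using h)]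
  simp

-- Common specification both loops compute (after the length guards).
def specScan : List String → Bool
  | [] => false
  | n :: rest => if is_prep n then rest.all is_nonterminal
                 else is_nonterminal n && specScan rest

theorem loopA_none (l : List String) (idx : Int) :
    isBasicPrepLoopA l idx none = specScan l := by
  induction l generalizing idx with
  | nil => rfl
  | cons n rest ih =>
    simp only [isBasicPrepLoopA, specScan, Option.isNone_none, Bool.and_true]
    by_cases hp : is_prep n = true
    · simp [hp, loopA_some]
    · simp only [hp, if_false, Bool.false_eq_true]
      by_cases hnt : is_nonterminal n = true
      · simp [hnt, ih]
      · simp [hnt]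

theorem bodyB_eq_spec (l : List String) (s : Int) :
    (match (PySem.List.enumerate l s).find? (fun p => is_prep p.2) with
     | none => false
     | some (i, _) =>
       ((PySem.List.enumerate l s).filter (fun p => p.1 ≠ i)).all (fun p => is_nonterminal p.2))
      = specScan l := by
  induction l generalizing s with
  | nil => simp [PySem.List.enumerate_nil, specScan]
  | cons n rest ih =>
    rw [find_enum_cons]
    by_cases hp : is_prep n = true
    · simp only [hp, if_true, specScan]
      exact filter_ne_head n rest s
    · simp only [hp, Bool.false_eq_true, if_false, specScan]
      rcases hfind : (PySem.List.enumerate rest (s + 1)).find? (fun p => is_prep p.2) with _ | ⟨i, m⟩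
      · have := ih (s + 1); rw [hfind] at this; rw [hfind]; simp [← this]
      · have hi : s ≠ i := by
          have hm := List.find?_some hfind
          have := List.mem_of_find?_eq_some hfind
          rcases (PySem.List.mem_enumerate_iff _ _ _).1 this with ⟨k, hk, heq⟩
          have : i = s + 1 + k := by
            have := congrArg Prod.fst heq; simpa using this
          omega
        have hB := ih (s + 1); rw [hfind] at hB
        simp only [] at hB
        rw [hfind]
        simp only []
        rw [filter_ne_cons_ne n rest s i hi, hB]

-- ===== VERDICT (by name: the statement is the Claim_ definition above) =====
theorem is_basic_prep_spec : Claim_equal_is_basic_prep := by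
  intro nodes edges _
  unfold Spec_is_basic_prep is_basic_prep is_basic_prep_alt
  by_cases h3 : nodes.length ≥ 3
  · by_cases h2 : edges.length ≥ 2
    · rw [if_neg (by simp [h3, h2]), if_neg (by simp only [Bool.or_eq_true, decide_eq_true_eq, not_or]; omega)]
      rw [loopA_none]
      exact (bodyB_eq_spec nodes 0).symm
    · rw [if_pos (by simp [h2]), if_pos (by simp only [Bool.or_eq_true, decide_eq_true_eq]; omega)]
  · rw [if_pos (by simp [h3]), if_pos (by simp only [Bool.or_eq_true, decide_eq_true_eq]; omega)]
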